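-- pv_equiv track=rewrite | github.com/vm910/note_solver | note_solver.py | set_notes
-- ===== SOURCE A (Python) =====
-- def set_notes(raw_notes):
--     notes = []
--     i = 0
--
--     while i < len(raw_notes):
--         if i + 1 <= len(raw_notes) - 1:
--             if raw_notes[i + 1] == '#' or raw_notes[i + 1] == 'b':
--                 notes.append(raw_notes[i] + raw_notes[i + 1])
--                 i += 2
--             else:
--                 notes.append(raw_notes[i])
--                 i += 1
--         else:
--             notes.append(raw_notes[i])
--             i += 1
--
--     return [n for n in notes if n != ' ']
-- ===== SOURCE B (Python) =====
-- def set_notes(raw_notes):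
--     tokens = []
--     pending = None
--     for ch in raw_notes:
--         if pending is None:
--             pending = ch
--         elif ch == '#' or ch == 'b':
--             tokens.append(pending + ch)
--             pending = None
--         else:
--             tokens.append(pending)
--             pending = ch
--     if pending is not None:
--         tokens.append(pending)
--     return [t for t in tokens if t != ' ']
-- ===== Notes on version B (the rewrite author's own statement) =====
-- stated objective: faster
-- what changed: Replaced the index-based while loop with lookahead raw_notes[i+1] by a single streaming pass over the characters that keeps one pending character of state and emits a token when it sees (or fails to see) a following modifier.
import Mathlib
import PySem

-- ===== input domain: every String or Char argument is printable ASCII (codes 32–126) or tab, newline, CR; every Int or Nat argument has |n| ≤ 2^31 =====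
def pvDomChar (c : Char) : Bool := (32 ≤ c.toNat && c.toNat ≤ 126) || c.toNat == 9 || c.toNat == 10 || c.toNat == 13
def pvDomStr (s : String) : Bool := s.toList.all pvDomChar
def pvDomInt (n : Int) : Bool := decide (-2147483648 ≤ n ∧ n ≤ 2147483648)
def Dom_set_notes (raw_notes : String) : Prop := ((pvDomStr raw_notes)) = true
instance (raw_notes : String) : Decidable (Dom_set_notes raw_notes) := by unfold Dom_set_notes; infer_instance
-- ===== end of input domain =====

-- B replaces A's index-walking lookahead loop by a single streaming pass with one
-- pending character of state (objective: faster by a constant factor: no per-step len() and index bookkeeping).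

-- ===== PORT A =====
-- A's while loop over the index i, appending tokens to `notes`; the guards make
-- every index access in range, so `getD` with a dummy default is exact here.
def setNotesLoop (s : List Char) (i : Nat) (notes : List String) : List String :=
  if i < s.length then
    if i + 1 ≤ s.length - 1 then
      let c1 := s.getD (i + 1) ' '
      if c1 = '#' ∨ c1 = 'b' then
        setNotesLoop s (i + 2) (notes ++ [String.ofList [s.getD i ' ', c1]])
      else
        setNotesLoop s (i + 1) (notes ++ [String.ofList [s.getD i ' ']])
    else
      setNotesLoop s (i + 1) (notes ++ [String.ofList [s.getD i ' ']])
  else notes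
termination_by s.length - i
decreasing_by all_goals omega

def set_notes (raw_notes : String) : List String :=
  (setNotesLoop raw_notes.toList 0 []).filter (fun n => n ≠ " ")

-- ===== PORT B =====
-- B's single pass: state = (tokens so far, pending character).
def setNotesStep (st : List String × Option Char) (ch : Char) : List String × Option Char :=
  match st.2 with
  | none => (st.1, some ch)
  | some p =>
    if ch = '#' ∨ ch = 'b' then (st.1 ++ [String.ofList [p, ch]], none)
    else (st.1 ++ [String.ofList [p]], some ch)

def setNotesFinish (st : List String × Option Char) : List String :=
  match st.2 with
  | none => st.1
  | some p => st.1 ++ [String.ofList [p]]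

def set_notes_alt (raw_notes : String) : List String :=
  (setNotesFinish (raw_notes.toList.foldl setNotesStep ([], none))).filter (fun t => t ≠ " ")

-- ===== PRECONDITION & SPEC =====
def Spec_set_notes (raw_notes : String) (out : List String) : Prop := out = set_notes_alt raw_notes
instance (raw_notes : String) (out : List String) : Decidable (Spec_set_notes raw_notes out) := by unfold Spec_set_notes; infer_instance

-- ===== CLAIM (what is proved, stated in full; the proofs are below) =====
def Claim_equal_set_notes : Prop := ∀ (raw_notes : String), Dom_set_notes raw_notes → Spec_set_notes raw_notes (set_notes raw_notes)

-- ===== LEMMAS AND PROOFS =====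

-- the common tokenisation both programs compute
def pvTok : List Char → List String
  | [] => []
  | [c] => [String.ofList [c]]
  | c :: d :: rest =>
    if d = '#' ∨ d = 'b' then String.ofList [c, d] :: pvTok rest
    else String.ofList [c] :: pvTok (d :: rest)

theorem setNotesLoop_eq_tok (s : List Char) (i : Nat) (notes : List String) :
    setNotesLoop s i notes = notes ++ pvTok (s.drop i) := by
  fun_induction setNotesLoop s i notes with
  | case1 i notes hlt hle c1 hmod ih =>
    have h2 : i + 1 < s.length := by omega
    rw [show c1 = s[i+1] from List.getD_eq_getElem s ' ' h2] at hmod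
    rw [ih, List.drop_eq_getElem_cons hlt, List.drop_eq_getElem_cons h2]
    simp only [pvTok, List.getD_eq_getElem s ' ' hlt]
    rw [if_pos hmod, show c1 = s[i+1] from List.getD_eq_getElem s ' ' h2]
    simp
  | case2 i notes hlt hle c1 hmod ih =>
    have h2 : i + 1 < s.length := by omega
    rw [show c1 = s[i+1] from List.getD_eq_getElem s ' ' h2] at hmod
    rw [ih, List.drop_eq_getElem_cons hlt, List.drop_eq_getElem_cons h2]
    simp only [pvTok, List.getD_eq_getElem s ' ' hlt]
    rw [if_neg hmod]
    simp
  | case3 i notes hlt hle ih =>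
    have hlast : i + 1 = s.length := by omega
    have hdrop : s.drop (i + 1) = [] := by simp [hlast]
    rw [ih, List.drop_eq_getElem_cons hlt, hdrop]
    simp [pvTok, List.getD, List.getElem?_eq_getElem hlt]
  | case4 i notes hlt =>
    have : s.drop i = [] := by simp [List.drop_eq_nil_iff]; omega
    simp [this, pvTok]

theorem foldl_step_none (l : List Char) :
    ∀ toks, setNotesFinish (l.foldl setNotesStep (toks, none)) = toks ++ pvTok l := by
  induction l using pvTok.induct with
  | case1 => intro toks; simp [setNotesFinish, pvTok]
  | case2 c => intro toks; simp [setNotesStep, setNotesFinish, pvTok]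
  | case3 c d rest hmod ih =>
    intro toks
    simp only [List.foldl_cons, setNotesStep, if_pos hmod]
    rw [ih, pvTok, if_pos hmod]
    simp
  | case4 c d rest hmod ih =>
    intro toks
    show setNotesFinish (List.foldl setNotesStep (setNotesStep (setNotesStep (toks, none) c) d) rest) = _
    simp only [setNotesStep, if_neg hmod]
    have : (List.foldl setNotesStep (toks ++ [String.ofList [c]], some d) rest)
         = (List.foldl setNotesStep (toks ++ [String.ofList [c]], none) (d :: rest)) := by
      simp [setNotesStep]
    rw [this, ih, pvTok, if_neg hmod]
    simp

-- ===== VERDICT (by name: the statement is the Claim_ definition above) =====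
theorem set_notes_spec : Claim_equal_set_notes := by
  intro s _
  unfold Spec_set_notes set_notes set_notes_alt
  rw [setNotesLoop_eq_tok, foldl_step_none]
  simp
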